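-- pv_equiv track=rewrite | github.com/spfantasy/LeetCode | OA/luckyNumberQuerys.py | SuperLuckyNums
-- ===== SOURCE A (Python) =====
-- def getLuckyNums(maximum):
--     if maximum < 4:
--         return []
--     elif maximum < 7:
--         return [4]
--     else:
--         lists = [4,7]
--         ptr = 0
--         while True:
--             length = len(lists)
--             for i in range(ptr,length):
--                 if lists[i]*10 + 4 <= maximum:
--                     lists.append(lists[i]*10 + 4)
--                 if lists[i]*10 + 7 <= maximum:
--                     lists.append(lists[i]*10 + 7)
--             if len(lists) == length:
--                 break
--             ptr = length
--         return lists#sorted(lists)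
--
-- def binarySearch(nums, target):
--     if len(nums) == 0:
--         return False, -1
--     start = 0
--     end = len(nums) - 1
--     while start + 1 < end:
--         mid = (start + end)//2
--         if nums[mid] > target:
--             end = mid
--         elif nums[mid] < target:
--             start = mid
--         else:
--             return True, mid
--     if nums[start] == target:
--         return True, start
--     elif nums[end] == target:
--         return True, end
--     elif nums[end] < target:
--         return False, end
--     elif nums[start] < target:
--         return False, start
--     else:
--         return False, -1
--
-- def SuperLuckyNums(querys):
--     maximum = max(pair[-1] for pair in querys)
--     luckyNums = getLuckyNums(maximum)
--     base = set()
--     def dfs(sln, luckyNums, maximum):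
--         if sln in base:
--             return
--         else:
--             if sln != 1:
--                 base.add(sln)
--             for num in luckyNums:
--                 if num*sln > maximum:
--                     return
--                 else:
--                     dfs(num*sln,luckyNums, maximum)
--     if len(luckyNums) > 0:
--         dfs(1,luckyNums,maximum)
--     base = sorted(list(base))
--     answers = []
--     for start, end in querys:
--         if start == end:
--             answers.append(int(binarySearch(base,start)[0]))
--         else:
--             judge_start, idx_start = binarySearch(base,start)
--             judge_end, idx_end = binarySearch(base,end)
--             answers.append(int(((idx_end - idx_start + 1) + judge_start - 1)))
--     return answers
-- ===== SOURCE B (Python) =====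
-- def getLuckyNums(maximum):
--     if maximum < 4:
--         return []
--     elif maximum < 7:
--         return [4]
--     else:
--         lists = [4,7]
--         ptr = 0
--         while True:
--             length = len(lists)
--             for i in range(ptr,length):
--                 if lists[i]*10 + 4 <= maximum:
--                     lists.append(lists[i]*10 + 4)
--                 if lists[i]*10 + 7 <= maximum:
--                     lists.append(lists[i]*10 + 7)
--             if len(lists) == length:
--                 break
--             ptr = length
--         return lists
--
-- def SuperLuckyNums(querys):
--     maximum = max(pair[-1] for pair in querys)
--     luckyNums = getLuckyNums(maximum)
--     base = set()
--     def dfs(sln, luckyNums, maximum):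
--         if sln in base:
--             return
--         else:
--             if sln != 1:
--                 base.add(sln)
--             for num in luckyNums:
--                 if num*sln > maximum:
--                     return
--                 else:
--                     dfs(num*sln,luckyNums, maximum)
--     if len(luckyNums) > 0:
--         dfs(1,luckyNums,maximum)
--     # answer by rank difference: #{x in base : x <= end} - #{x in base : x < start},
--     # no sorting, no binary search, no start == end special case
--     return [sum(1 for x in base if x <= end) - sum(1 for x in base if x < start)
--             for start, end in querys]
-- ===== Notes on version B (the rewrite author's own statement) =====
-- stated objective: simpler
-- what changed: B keeps A's generation of the super-lucky set but answers each query by a rank-difference linear count over the unsorted set (#{x<=end} - #{x<start}), eliminating the sort, the hand-rolled binary search, its index arithmetic and the start==end special case.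
import Mathlib
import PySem

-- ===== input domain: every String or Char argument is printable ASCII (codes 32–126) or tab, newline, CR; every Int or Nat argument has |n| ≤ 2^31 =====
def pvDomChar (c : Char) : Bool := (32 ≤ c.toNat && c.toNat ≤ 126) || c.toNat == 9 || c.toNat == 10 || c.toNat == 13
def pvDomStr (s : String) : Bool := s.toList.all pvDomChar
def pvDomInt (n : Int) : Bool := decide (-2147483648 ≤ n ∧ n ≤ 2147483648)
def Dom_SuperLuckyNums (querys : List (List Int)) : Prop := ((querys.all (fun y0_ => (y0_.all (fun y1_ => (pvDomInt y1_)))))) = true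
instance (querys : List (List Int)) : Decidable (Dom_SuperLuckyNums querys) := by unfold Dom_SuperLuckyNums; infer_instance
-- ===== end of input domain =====

-- B keeps A's generation of the super-lucky set (Source B repeats getLuckyNums/dfs verbatim, so the
-- two ports share those helpers' transliterations) but answers each query by a rank-difference
-- linear count over the unsorted set instead of sorting + hand-rolled binary search (objective: simpler).

-- ===== PORT A =====
-- shared helper: the 'while True' worklist of getLuckyNums.  Python loops until no growth; the
-- fuel argument only makes the recursion total and is never reached for the bounded ints of Dom_
-- (each growing round multiplies the smallest new element by 10, so ≤ 12 rounds below 2^31).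
def getLuckyLoopP (maximum : Int) : Nat → List Int → Int → List Int
  | 0, lists, _ => lists
  | fuel+1, lists, ptr =>
    let length : Int := lists.length
    let lists' := (PySem.List.pyRange ptr length 1).foldl (fun acc i =>
        -- lists[i] always reads i < length, i.e. the snapshot taken at round start: exact
        let v := PySem.List.pyGetD lists i 0
        let acc := if v * 10 + 4 ≤ maximum then acc ++ [v * 10 + 4] else acc
        if v * 10 + 7 ≤ maximum then acc ++ [v * 10 + 7] else acc) lists
    if lists'.length = lists.length then lists'
    else getLuckyLoopP maximum fuel lists' length

def getLuckyNumsP (maximum : Int) : List Int :=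
  if maximum < 4 then []
  else if maximum < 7 then [4]
  else getLuckyLoopP maximum 64 [4, 7] 0

-- shared helper: the recursive dfs over products; fuel bounds the recursion DEPTH only (each
-- nested call multiplies sln by ≥ 4, so depth ≤ 17 for the bounded ints of Dom_).
-- Python's 'base' is a hash set; it is ported as Std.HashSet Int (same set semantics over Int)
-- because a list-backed set makes these ~10^5 membership tests unevaluatable at Dom_'s 2^31 bounds.
mutual
def dfsP (luckyNums : List Int) (maximum : Int) (fuel : Nat) (sln : Int) (base : Std.HashSet Int) : Std.HashSet Int :=
  match fuel with
  | 0 => base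
  | fuel'+1 =>
    if base.contains sln then base
    else
      let base' := if sln ≠ 1 then base.insert sln else base
      dfsLoopP luckyNums maximum fuel' sln luckyNums base'
  termination_by (fuel, 0)

def dfsLoopP (luckyNums : List Int) (maximum : Int) (fuel : Nat) (sln : Int) (nums : List Int) (base : Std.HashSet Int) : Std.HashSet Int :=
  match nums with
  | [] => base
  | num :: rest =>
    if num * sln > maximum then base
    else dfsLoopP luckyNums maximum fuel sln rest (dfsP luckyNums maximum fuel (num * sln) base)
  termination_by (fuel, nums.length + 1)
end

-- A-only helper: the hand-rolled binarySearch's while loop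
def binSearchLoopP (nums : List Int) (target : Int) (start end_ : Int) : Bool × Int :=
  if _h : start + 1 < end_ then
    let mid := PySem.Int.floordiv (start + end_) 2
    let v := PySem.List.pyGetD nums mid 0
    if v > target then binSearchLoopP nums target start mid
    else if v < target then binSearchLoopP nums target mid end_
    else (true, mid)
  else
    if PySem.List.pyGetD nums start 0 = target then (true, start)
    else if PySem.List.pyGetD nums end_ 0 = target then (true, end_)
    else if PySem.List.pyGetD nums end_ 0 < target then (false, end_)
    else if PySem.List.pyGetD nums start 0 < target then (false, start)
    else (false, -1)
  termination_by (end_ - start).toNat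
  decreasing_by
  · have h2 : start + 1 ≤ PySem.Int.floordiv (start + end_) 2 := by
      rw [PySem.Int.le_floordiv_iff_mul_le (by norm_num)]; omega
    have h3 : PySem.Int.floordiv (start + end_) 2 < end_ := by
      rw [PySem.Int.floordiv_lt_iff_lt_mul (by norm_num)]; omega
    omega
  · have h2 : start + 1 ≤ PySem.Int.floordiv (start + end_) 2 := by
      rw [PySem.Int.le_floordiv_iff_mul_le (by norm_num)]; omega
    have h3 : PySem.Int.floordiv (start + end_) 2 < end_ := by
      rw [PySem.Int.floordiv_lt_iff_lt_mul (by norm_num)]; omega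
    omega

def binarySearchP (nums : List Int) (target : Int) : Bool × Int :=
  if nums.length = 0 then (false, -1)
  else binSearchLoopP nums target 0 ((nums.length : Int) - 1)

def SuperLuckyNums (querys : List (List Int)) : List Int :=
  -- max(...) raises on empty querys, pair[-1] on an empty pair: Pre_ excludes those, the defaults never fire there
  let maximum := (PySem.List.max? (querys.map (fun pair => PySem.List.pyGetD pair (-1) 0)) (fun x => x)).getD 0
  let luckyNums := getLuckyNumsP maximum
  let base : Std.HashSet Int :=
    if luckyNums.length > 0 then dfsP luckyNums maximum 64 1 ∅ else ∅
  -- sorted(list(base)): list(set) order is arbitrary and immediately sorted; Python's library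
  -- sort is ported as the library sort List.mergeSort (stable, same result)
  let baseS := List.mergeSort base.toList (fun a b => decide (a ≤ b))
  -- 'for start, end in querys' unpacks pairs: Pre_ guarantees length 2
  querys.foldl (fun answers pair =>
    let start := PySem.List.pyGetD pair 0 0
    let end_ := PySem.List.pyGetD pair 1 0
    if start = end_ then
      answers ++ [if (binarySearchP baseS start).1 then (1 : Int) else 0]
    else
      let js := (binarySearchP baseS start).1
      let is_ := (binarySearchP baseS start).2
      let ie := (binarySearchP baseS end_).2
      answers ++ [(ie - is_ + 1) + (if js then (1 : Int) else 0) - 1]) []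

-- ===== PORT B =====
-- Source B keeps A's generation helpers verbatim (same code, its own copies), so the B-side
-- transliterations below are textually identical to A's; the query-answering phase is B's own.
def getLuckyLoopB (maximum : Int) : Nat → List Int → Int → List Int
  | 0, lists, _ => lists
  | fuel+1, lists, ptr =>
    let length : Int := lists.length
    let lists' := (PySem.List.pyRange ptr length 1).foldl (fun acc i =>
        let v := PySem.List.pyGetD lists i 0
        let acc := if v * 10 + 4 ≤ maximum then acc ++ [v * 10 + 4] else acc
        if v * 10 + 7 ≤ maximum then acc ++ [v * 10 + 7] else acc) lists
    if lists'.length = lists.length then lists'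
    else getLuckyLoopB maximum fuel lists' length

def getLuckyNumsB (maximum : Int) : List Int :=
  if maximum < 4 then []
  else if maximum < 7 then [4]
  else getLuckyLoopB maximum 64 [4, 7] 0

mutual
def dfsB (luckyNums : List Int) (maximum : Int) (fuel : Nat) (sln : Int) (base : Std.HashSet Int) : Std.HashSet Int :=
  match fuel with
  | 0 => base
  | fuel'+1 =>
    if base.contains sln then base
    else
      let base' := if sln ≠ 1 then base.insert sln else base
      dfsLoopB luckyNums maximum fuel' sln luckyNums base'
  termination_by (fuel, 0)

def dfsLoopB (luckyNums : List Int) (maximum : Int) (fuel : Nat) (sln : Int) (nums : List Int) (base : Std.HashSet Int) : Std.HashSet Int :=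
  match nums with
  | [] => base
  | num :: rest =>
    if num * sln > maximum then base
    else dfsLoopB luckyNums maximum fuel sln rest (dfsB luckyNums maximum fuel (num * sln) base)
  termination_by (fuel, nums.length + 1)
end

def SuperLuckyNums_alt (querys : List (List Int)) : List Int :=
  let maximum := (PySem.List.max? (querys.map (fun pair => PySem.List.pyGetD pair (-1) 0)) (fun x => x)).getD 0
  let luckyNums := getLuckyNumsB maximum
  let base : Std.HashSet Int :=
    if luckyNums.length > 0 then dfsB luckyNums maximum 64 1 ∅ else ∅
  querys.map (fun pair =>
    let start := PySem.List.pyGetD pair 0 0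
    let end_ := PySem.List.pyGetD pair 1 0
    ((base.toList.countP (fun x => decide (x ≤ end_))) : Int) - ((base.toList.countP (fun x => decide (x < start))) : Int))

-- ===== PRECONDITION & SPEC =====
-- Pre_ excludes exactly the inputs where the Python A raises: empty querys (ValueError from max)
-- and query lists whose length is not 2 (IndexError on pair[-1] / ValueError on unpacking).
def Pre_SuperLuckyNums (querys : List (List Int)) : Prop :=
  querys ≠ [] ∧ ∀ q ∈ querys, q.length = 2
instance (querys : List (List Int)) : Decidable (Pre_SuperLuckyNums querys) := by
  unfold Pre_SuperLuckyNums; infer_instance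

def pvWitness_SuperLuckyNums : List (List Int) := [[4, 7]]

def Spec_SuperLuckyNums (querys : List (List Int)) (out : List Int) : Prop := out = SuperLuckyNums_alt querys
instance (querys : List (List Int)) (out : List Int) : Decidable (Spec_SuperLuckyNums querys out) := by unfold Spec_SuperLuckyNums; infer_instance

-- ===== CLAIM (what is proved, stated in full; the proofs are below) =====
def Claim_equal_SuperLuckyNums : Prop := ∀ (querys : List (List Int)), Dom_SuperLuckyNums querys → Pre_SuperLuckyNums querys → Spec_SuperLuckyNums querys (SuperLuckyNums querys)

-- ===== LEMMAS AND PROOFS =====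

-- abbreviation used throughout: the number of elements < t
def cntLT (nums : List Int) (t : Int) : Nat := nums.countP (fun x => decide (x < t))

-- F1: in a strictly increasing list the elements < t are exactly the first cntLT of them
theorem getElem_lt_iff (t : Int) : ∀ (nums : List Int), nums.Pairwise (· < ·) →
    ∀ i (h : i < nums.length), (nums[i] < t ↔ i < cntLT nums t) := by
  intro nums
  induction nums with
  | nil => intro _ i h; simp at h
  | cons x xs ih =>
    intro hp i h
    rw [List.pairwise_cons] at hp
    have hcnt : cntLT (x :: xs) t = (if x < t then 1 else 0) + cntLT xs t := by
      simp only [cntLT, List.countP_cons, decide_eq_true_eq]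
      split_ifs with hx <;> omega
    cases i with
    | zero =>
      simp only [List.getElem_cons_zero]
      by_cases hx : x < t
      · simp [hcnt, hx]
      · have hz : cntLT xs t = 0 := by
          rw [cntLT, List.countP_eq_zero]
          intro y hy
          have := hp.1 y hy
          simp only [decide_eq_true_eq]
          omega
        simp [hcnt, hx, hz]
    | succ n =>
      simp only [List.getElem_cons_succ]
      have hn : n < xs.length := by simpa using h
      rw [hcnt]
      by_cases hx : x < t
      · rw [ih hp.2 n hn]; simp only [if_pos hx]; omega
      · have hz : cntLT xs t = 0 := by
          rw [cntLT, List.countP_eq_zero]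
          intro y hy
          have := hp.1 y hy
          simp only [decide_eq_true_eq]
          omega
        have hnl : ¬ xs[n] < t := by
          have := hp.1 _ (List.getElem_mem hn)
          omega
        simp [hx, hz, hnl]

-- F2b: a hit sits exactly at index cntLT
theorem getElem_eq_imp (t : Int) (nums : List Int) (hp : nums.Pairwise (· < ·))
    (i : Nat) (h : i < nums.length) (he : nums[i] = t) : i = cntLT nums t := by
  have h1 : ¬ (nums[i] < t) := by rw [he]; omega
  have h2 : cntLT nums t ≤ i := by
    have := (getElem_lt_iff t nums hp i h).not.mp h1
    omega
  by_contra hne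
  have hlt : cntLT nums t < i := by omega
  have hc : cntLT nums t < nums.length := lt_trans hlt h
  have h3 : nums[cntLT nums t] < nums[i] :=
    List.pairwise_iff_getElem.mp hp _ i hc h hlt
  have h4 : nums[cntLT nums t] < t := lt_of_lt_of_le h3 (le_of_eq he)
  have h5 := (getElem_lt_iff t nums hp _ hc).mp h4
  omega

-- F2a: if t is present it sits at index cntLT
theorem mem_getElem_cnt (t : Int) (nums : List Int) (hp : nums.Pairwise (· < ·))
    (hm : t ∈ nums) : ∃ h : cntLT nums t < nums.length, nums[cntLT nums t] = t := by
  obtain ⟨i, h, he⟩ := List.mem_iff_getElem.mp hm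
  have := getElem_eq_imp t nums hp i h he
  subst this
  exact ⟨h, he⟩

-- the terminal if-chain of A's binary-search loop
theorem binSearchExit (nums : List Int) (t : Int) (hp : nums.Pairwise (· < ·))
    (start end_ : Int) (hex : ¬ (start + 1 < end_)) (h0 : 0 ≤ start) (hse : start ≤ end_)
    (hlen : end_ < nums.length)
    (inv1 : start = 0 ∨ PySem.List.pyGetD nums start 0 < t)
    (inv2 : end_ = (nums.length : Int) - 1 ∨ t < PySem.List.pyGetD nums end_ 0) :
    binSearchLoopP nums t start end_ =
      (decide (t ∈ nums), (cntLT nums t : Int) + (if t ∈ nums then 1 else 0) - 1) := by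
  have he0 : 0 ≤ end_ := by omega
  have hsl : start.toNat < nums.length := by omega
  have hel : end_.toNat < nums.length := by omega
  have hcb : cntLT nums t ≤ nums.length := List.countP_le_length
  rw [binSearchLoopP, dif_neg hex]
  rw [PySem.List.pyGetD_eq_getElem nums 0 h0 (by omega)] at inv1 ⊢
  rw [PySem.List.pyGetD_eq_getElem nums 0 he0 (by omega)] at inv2 ⊢
  by_cases h1 : nums[start.toNat] = t
  · rw [if_pos h1]
    have hc := getElem_eq_imp t nums hp _ hsl h1
    have hm : t ∈ nums := h1 ▸ List.getElem_mem hsl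
    simp [hm, Prod.ext_iff]
    omega
  · rw [if_neg h1]
    by_cases h2 : nums[end_.toNat] = t
    · rw [if_pos h2]
      have hc := getElem_eq_imp t nums hp _ hel h2
      have hm : t ∈ nums := h2 ▸ List.getElem_mem hel
      simp [hm, Prod.ext_iff]
      omega
    · rw [if_neg h2]
      by_cases h3 : nums[end_.toNat] < t
      · rw [if_pos h3]
        have hec : end_.toNat < cntLT nums t := (getElem_lt_iff t nums hp _ hel).mp h3
        have hend : end_ = (nums.length : Int) - 1 := by
          rcases inv2 with h | h
          · exact h
          · omega
        have hnm : t ∉ nums := by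
          intro hm
          obtain ⟨hcl, _⟩ := mem_getElem_cnt t nums hp hm
          omega
        simp [hnm, Prod.ext_iff]
        omega
      · rw [if_neg h3]
        by_cases h4 : nums[start.toNat] < t
        · rw [if_pos h4]
          have hsc : start.toNat < cntLT nums t := (getElem_lt_iff t nums hp _ hsl).mp h4
          have hce : cntLT nums t ≤ end_.toNat := by
            have := (getElem_lt_iff t nums hp _ hel).not.mp h3
            omega
          have hnm : t ∉ nums := by
            intro hm
            obtain ⟨hcl, hce2⟩ := mem_getElem_cnt t nums hp hm
            have hceq : cntLT nums t = end_.toNat := by omega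
            simp only [hceq] at hce2
            exact h2 hce2
          simp [hnm, Prod.ext_iff]
          omega
        · rw [if_neg h4]
          have hstart0 : start = 0 := by
            rcases inv1 with h | h
            · exact h
            · omega
          have hc0 : cntLT nums t = 0 := by
            have := (getElem_lt_iff t nums hp _ hsl).not.mp h4
            omega
          have hnm : t ∉ nums := by
            intro hm
            obtain ⟨hcl, hce2⟩ := mem_getElem_cnt t nums hp hm
            have hceq : cntLT nums t = start.toNat := by omega
            simp only [hceq] at hce2
            exact h1 hce2
          simp [hnm, Prod.ext_iff]
          omega

-- characterization of A's binary-search loop on a strictly increasing list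
theorem binSearchLoop_spec (nums : List Int) (t : Int) (hp : nums.Pairwise (· < ·)) :
    ∀ (k : Nat) (start end_ : Int), (end_ - start).toNat ≤ k →
    0 ≤ start → start ≤ end_ → end_ < nums.length →
    (start = 0 ∨ PySem.List.pyGetD nums start 0 < t) →
    (end_ = (nums.length : Int) - 1 ∨ t < PySem.List.pyGetD nums end_ 0) →
    binSearchLoopP nums t start end_ =
      (decide (t ∈ nums), (cntLT nums t : Int) + (if t ∈ nums then 1 else 0) - 1) := by
  intro k
  induction k with
  | zero =>
    intro start end_ hk h0 hse hlen inv1 inv2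
    exact binSearchExit nums t hp start end_ (by omega) h0 hse hlen inv1 inv2
  | succ k ih =>
    intro start end_ hk h0 hse hlen inv1 inv2
    by_cases hlt : start + 1 < end_
    · have hm1 : start + 1 ≤ PySem.Int.floordiv (start + end_) 2 := by
        rw [PySem.Int.le_floordiv_iff_mul_le (by norm_num)]; omega
      have hm2 : PySem.Int.floordiv (start + end_) 2 < end_ := by
        rw [PySem.Int.floordiv_lt_iff_lt_mul (by norm_num)]; omega
      rw [binSearchLoopP]
      simp only [dif_pos hlt]
      set mid := PySem.Int.floordiv (start + end_) 2 with hmid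
      have hm0 : 0 ≤ mid := by omega
      have hmlen : mid.toNat < nums.length := by omega
      rw [PySem.List.pyGetD_eq_getElem nums 0 hm0 (by omega)]
      by_cases hv1 : nums[mid.toNat] > t
      · rw [if_pos hv1]
        exact ih start mid (by omega) h0 (by omega) (by omega) inv1
          (Or.inr (by rw [PySem.List.pyGetD_eq_getElem nums 0 hm0 (by omega)]; exact hv1))
      · rw [if_neg hv1]
        by_cases hv2 : nums[mid.toNat] < t
        · rw [if_pos hv2]
          exact ih mid end_ (by omega) hm0 (by omega) hlen
            (Or.inr (by rw [PySem.List.pyGetD_eq_getElem nums 0 hm0 (by omega)]; exact hv2))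
            inv2
        · rw [if_neg hv2]
          have heq : nums[mid.toNat] = t := by omega
          have hc := getElem_eq_imp t nums hp _ hmlen heq
          have hm : t ∈ nums := heq ▸ List.getElem_mem hmlen
          simp [hm, Prod.ext_iff]
          omega
    · exact binSearchExit nums t hp start end_ hlt h0 hse hlen inv1 inv2

theorem binSearch_spec (nums : List Int) (t : Int) (hp : nums.Pairwise (· < ·)) :
    binarySearchP nums t =
      (decide (t ∈ nums), (cntLT nums t : Int) + (if t ∈ nums then 1 else 0) - 1) := by
  by_cases h0 : nums.length = 0
  · have hnil : nums = [] := List.length_eq_zero_iff.mp h0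
    subst hnil
    have hnm : t ∉ ([] : List Int) := by simp
    rw [binarySearchP]
    simp [cntLT, hnm]
  · rw [binarySearchP, if_neg h0]
    exact binSearchLoop_spec nums t hp ((nums.length : Int) - 1).toNat 0 ((nums.length : Int) - 1)
      (by omega) (by omega) (by omega) (by omega) (Or.inl rfl) (Or.inl rfl)

-- counting ≤ t splits into counting < t plus a possible hit (duplicate-free list)
theorem countP_le_split (t : Int) : ∀ (l : List Int), l.Nodup →
    l.countP (fun x => decide (x ≤ t)) = cntLT l t + (if t ∈ l then 1 else 0) := by
  intro l
  induction l with
  | nil => simp [cntLT]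
  | cons x xs ih =>
    intro hnd
    rw [List.nodup_cons] at hnd
    have hih := ih hnd.2
    simp only [cntLT, List.countP_cons, List.mem_cons] at *
    by_cases hxt : x = t
    · subst hxt
      have hnot : x ∉ xs := hnd.1
      simp only [hnot, or_false, le_refl, decide_true, lt_irrefl, decide_false]
      simp [hih, hnot]
    · have hne : ¬ (t = x) := fun h => hxt h.symm
      by_cases hmem : t ∈ xs <;>
        by_cases hxlt : x < t <;>
          simp [hih, hmem, hne, hxlt, show (x ≤ t ↔ x < t) from by omega]

-- B's verbatim copies of the generation helpers compute the same as A's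
theorem getLuckyLoopB_eq (maximum : Int) : ∀ (fuel : Nat) (lists : List Int) (ptr : Int),
    getLuckyLoopB maximum fuel lists ptr = getLuckyLoopP maximum fuel lists ptr := by
  intro fuel
  induction fuel with
  | zero => intro lists ptr; rw [getLuckyLoopB, getLuckyLoopP]
  | succ f ih =>
    intro lists ptr
    rw [getLuckyLoopB, getLuckyLoopP]
    split_ifs with h
    · rfl
    · exact ih _ _

theorem getLuckyNumsB_eq : getLuckyNumsB = getLuckyNumsP := by
  funext maximum
  rw [getLuckyNumsB, getLuckyNumsP]
  split_ifs
  · rfl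
  · rfl
  · exact getLuckyLoopB_eq maximum 64 [4, 7] 0

theorem dfsB_eq_aux (L : List Int) (M : Int) : ∀ fuel : Nat,
    (∀ (sln : Int) (base : Std.HashSet Int), dfsB L M fuel sln base = dfsP L M fuel sln base) ∧
    (∀ (sln : Int) (nums : List Int) (base : Std.HashSet Int),
       dfsLoopB L M fuel sln nums base = dfsLoopP L M fuel sln nums base) := by
  intro fuel
  induction fuel with
  | zero =>
    have hP : ∀ (sln : Int) (base : Std.HashSet Int), dfsB L M 0 sln base = dfsP L M 0 sln base := by
      intro sln base; rw [dfsB, dfsP]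
    refine ⟨hP, ?_⟩
    intro sln nums
    induction nums with
    | nil => intro base; rw [dfsLoopB, dfsLoopP]
    | cons num rest ihl =>
      intro base
      rw [dfsLoopB, dfsLoopP]
      split_ifs with h1
      · rfl
      · rw [hP, ihl]
  | succ f ihf =>
    have hP : ∀ (sln : Int) (base : Std.HashSet Int),
        dfsB L M (f + 1) sln base = dfsP L M (f + 1) sln base := by
      intro sln base
      rw [dfsB, dfsP]
      split_ifs with h1 h2
      · rfl
      · exact ihf.2 _ _ _
      · exact ihf.2 _ _ _
    refine ⟨hP, ?_⟩
    intro sln nums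
    induction nums with
    | nil => intro base; rw [dfsLoopB, dfsLoopP]
    | cons num rest ihl =>
      intro base
      rw [dfsLoopB, dfsLoopP]
      split_ifs with h1
      · rfl
      · rw [hP, ihl]

theorem dfsB_eq : dfsB = dfsP := by
  funext L M fuel sln base
  exact (dfsB_eq_aux L M fuel).1 sln base

-- a hash set's element list never has duplicates
theorem hashset_toList_nodup (s : Std.HashSet Int) : s.toList.Nodup := by
  have h := @Std.HashSet.distinct_toList Int _ _ s _ _
  exact h.imp (fun hab => by simpa using hab)

theorem pairwise_lt_of_le_nodup (l : List Int) (h1 : l.Pairwise (· ≤ ·)) (h2 : l.Nodup) :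
    l.Pairwise (· < ·) := by
  exact (h1.and h2).imp (fun h => lt_of_le_of_ne h.1 h.2)

-- A's per-query answer equals B's rank difference, for any duplicate-free base list
theorem answer_eq (base : List Int) (hnd : List.Nodup base) (s e : Int) :
    (if s = e then (if (binarySearchP (List.mergeSort base (fun a b => decide (a ≤ b))) s).1 then (1 : Int) else 0)
     else ((binarySearchP (List.mergeSort base (fun a b => decide (a ≤ b))) e).2
            - (binarySearchP (List.mergeSort base (fun a b => decide (a ≤ b))) s).2 + 1)
          + (if (binarySearchP (List.mergeSort base (fun a b => decide (a ≤ b))) s).1 then (1 : Int) else 0) - 1)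
    = ((base.countP (fun x => decide (x ≤ e))) : Int) - ((base.countP (fun x => decide (x < s))) : Int) := by
  set sb := List.mergeSort base (fun a b => decide (a ≤ b)) with hsb
  have hperm : sb.Perm base := List.mergeSort_perm base _
  have hnd2 : sb.Nodup := hperm.nodup_iff.mpr hnd
  have hple : sb.Pairwise (· ≤ ·) := by
    have := List.pairwise_mergeSort (le := fun a b : Int => decide (a ≤ b))
      (fun a b c hab hbc => by simp at *; omega) (fun a b => by simp; omega) base
    exact this.imp (fun h => by simpa using h)
  have hplt : sb.Pairwise (· < ·) := pairwise_lt_of_le_nodup sb hple hnd2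
  have hbs := binSearch_spec sb s hplt
  have hbe := binSearch_spec sb e hplt
  have hcs : cntLT sb s = base.countP (fun x => decide (x < s)) := hperm.countP_eq _
  have hcle : sb.countP (fun x => decide (x ≤ e)) = base.countP (fun x => decide (x ≤ e)) := hperm.countP_eq _
  have hsplit := countP_le_split e sb hnd2
  have hmeme : (e ∈ sb) ↔ e ∈ base := hperm.mem_iff
  rw [hbs, hbe]
  rw [← hcle, hsplit, ← hcs]
  by_cases hse : s = e
  · subst hse
    by_cases hms : s ∈ sb <;> simp [hms]
  · rw [if_neg hse]
    by_cases hms : s ∈ sb <;> by_cases hme : e ∈ sb <;> simp [hms, hme] <;> omega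

-- the two query-answering loops agree for ANY duplicate-free base set
theorem ports_eq_core (qs : List (List Int)) (b : List Int) (hnd : List.Nodup b) :
    qs.foldl (fun answers pair =>
      if PySem.List.pyGetD pair 0 0 = PySem.List.pyGetD pair 1 0 then
        answers ++ [if (binarySearchP (List.mergeSort b (fun a b => decide (a ≤ b))) (PySem.List.pyGetD pair 0 0)).1 then (1 : Int) else 0]
      else
        answers ++ [((binarySearchP (List.mergeSort b (fun a b => decide (a ≤ b))) (PySem.List.pyGetD pair 1 0)).2
                      - (binarySearchP (List.mergeSort b (fun a b => decide (a ≤ b))) (PySem.List.pyGetD pair 0 0)).2 + 1)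
                    + (if (binarySearchP (List.mergeSort b (fun a b => decide (a ≤ b))) (PySem.List.pyGetD pair 0 0)).1 then (1 : Int) else 0) - 1]) []
    = qs.map (fun pair =>
        ((b.countP (fun x => decide (x ≤ PySem.List.pyGetD pair 1 0))) : Int)
          - ((b.countP (fun x => decide (x < PySem.List.pyGetD pair 0 0))) : Int)) := by
  have hfun : (fun (answers : List Int) (pair : List Int) =>
      if PySem.List.pyGetD pair 0 0 = PySem.List.pyGetD pair 1 0 then
        answers ++ [if (binarySearchP (List.mergeSort b (fun a b => decide (a ≤ b))) (PySem.List.pyGetD pair 0 0)).1 then (1 : Int) else 0]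
      else
        answers ++ [((binarySearchP (List.mergeSort b (fun a b => decide (a ≤ b))) (PySem.List.pyGetD pair 1 0)).2
                      - (binarySearchP (List.mergeSort b (fun a b => decide (a ≤ b))) (PySem.List.pyGetD pair 0 0)).2 + 1)
                    + (if (binarySearchP (List.mergeSort b (fun a b => decide (a ≤ b))) (PySem.List.pyGetD pair 0 0)).1 then (1 : Int) else 0) - 1])
    = (fun (answers : List Int) (pair : List Int) =>
        answers ++ [if PySem.List.pyGetD pair 0 0 = PySem.List.pyGetD pair 1 0 then
          (if (binarySearchP (List.mergeSort b (fun a b => decide (a ≤ b))) (PySem.List.pyGetD pair 0 0)).1 then (1 : Int) else 0)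
        else
          ((binarySearchP (List.mergeSort b (fun a b => decide (a ≤ b))) (PySem.List.pyGetD pair 1 0)).2
                      - (binarySearchP (List.mergeSort b (fun a b => decide (a ≤ b))) (PySem.List.pyGetD pair 0 0)).2 + 1)
                    + (if (binarySearchP (List.mergeSort b (fun a b => decide (a ≤ b))) (PySem.List.pyGetD pair 0 0)).1 then (1 : Int) else 0) - 1]) := by
    funext answers pair
    by_cases h : PySem.List.pyGetD pair 0 0 = PySem.List.pyGetD pair 1 0 <;> simp [h]
  rw [hfun, PySem.List.foldl_append_singleton_eq_map]
  simp only [List.nil_append]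
  refine List.map_congr_left ?_
  intro pair _
  exact answer_eq b hnd (PySem.List.pyGetD pair 0 0) (PySem.List.pyGetD pair 1 0)

-- ===== VERDICT (by name: the statement is the Claim_ definition above) =====
theorem SuperLuckyNums_spec : Claim_equal_SuperLuckyNums := by
  intro querys _hdom _hpre
  show SuperLuckyNums querys = SuperLuckyNums_alt querys
  unfold SuperLuckyNums_alt
  rw [getLuckyNumsB_eq, dfsB_eq]
  exact ports_eq_core querys _ (hashset_toList_nodup _)
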